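-- pv_equiv track=rewrite | github.com/mudigolambharath256-max/WE_SEC | python/core/context_profiler.py | extract_compliance_triggers
-- ===== SOURCE A (Python) =====
-- from typing import Dict, List, Optional
--
-- def extract_compliance_triggers(successful_prompts: List[str]) -> List[str]:
--     """
--     Extract patterns from successful prompts.
--
--     Args:
--         successful_prompts: Prompts that achieved compliance
--
--     Returns:
--         list: Common compliance triggers
--     """
--     triggers = []
--
--     common_triggers = [
--         "for educational purposes",
--         "hypothetically",
--         "in a fictional scenario",
--         "as an example",
--         "to help me understand",
--     ]
--
--     for trigger in common_triggers:
--         count = sum(1 for p in successful_prompts if trigger in p.lower())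
--         if count > 0:
--             triggers.append(trigger)
--
--     return triggers
-- ===== SOURCE B (Python) =====
-- def extract_compliance_triggers(successful_prompts):
--     common_triggers = [
--         "for educational purposes",
--         "hypothetically",
--         "in a fictional scenario",
--         "as an example",
--         "to help me understand",
--     ]
--     corpus = "\n".join(p.lower() for p in successful_prompts)
--     return [t for t in common_triggers if t in corpus]
-- ===== Notes on version B (the rewrite author's own statement) =====
-- stated objective: faster
-- what changed: B concatenates all lowered prompts into one newline-joined corpus (newline occurs in no trigger, so a trigger is a substring of the corpus iff it is a substring of some prompt) and does a single substring test per trigger on that corpus, eliminating A's per-trigger counting loop that re-lowercases every prompt for each trigger.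
import Mathlib
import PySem

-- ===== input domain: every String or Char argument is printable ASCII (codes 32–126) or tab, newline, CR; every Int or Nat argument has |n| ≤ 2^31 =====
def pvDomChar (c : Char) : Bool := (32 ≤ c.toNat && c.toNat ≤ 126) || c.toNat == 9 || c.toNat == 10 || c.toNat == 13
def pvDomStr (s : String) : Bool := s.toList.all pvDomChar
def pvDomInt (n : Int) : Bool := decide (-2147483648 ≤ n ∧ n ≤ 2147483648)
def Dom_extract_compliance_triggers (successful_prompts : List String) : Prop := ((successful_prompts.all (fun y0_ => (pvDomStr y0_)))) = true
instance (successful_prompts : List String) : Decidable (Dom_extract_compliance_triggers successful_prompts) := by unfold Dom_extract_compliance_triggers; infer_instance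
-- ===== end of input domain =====

-- B joins all lowered prompts into one newline-separated corpus (newline occurs in no trigger)
-- and tests each trigger once against it, instead of A's per-trigger counting scan over the prompts; same return value.

def pvCommonTriggers : List String :=
  ["for educational purposes",
   "hypothetically",
   "in a fictional scenario",
   "as an example",
   "to help me understand"]

-- ===== PORT A =====
def extract_compliance_triggers (successful_prompts : List String) : List String :=
  pvCommonTriggers.foldl (fun triggers trigger =>
    let count : Int := successful_prompts.foldl
      (fun acc p => if PySem.Str.isIn trigger (PySem.Str.lower p) then acc + 1 else acc) 0
    if count > 0 then triggers ++ [trigger] else triggers) []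

-- ===== PORT B =====
def extract_compliance_triggers_alt (successful_prompts : List String) : List String :=
  let corpus : String := PySem.Str.join "\n" (successful_prompts.map PySem.Str.lower)
  pvCommonTriggers.filter (fun t => PySem.Str.isIn t corpus)

-- ===== PRECONDITION & SPEC =====
def Spec_extract_compliance_triggers (successful_prompts : List String) (out : List String) : Prop := out = extract_compliance_triggers_alt successful_prompts
instance (successful_prompts : List String) (out : List String) : Decidable (Spec_extract_compliance_triggers successful_prompts out) := by unfold Spec_extract_compliance_triggers; infer_instance

-- ===== CLAIM (what is proved, stated in full; the proofs are below) =====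
def Claim_equal_extract_compliance_triggers : Prop := ∀ (successful_prompts : List String), Dom_extract_compliance_triggers successful_prompts → Spec_extract_compliance_triggers successful_prompts (extract_compliance_triggers successful_prompts)

-- ===== LEMMAS AND PROOFS =====

-- a sep-free nonempty prefix of `a ++ sep :: r` is a prefix of `a`
theorem pv_prefix_of_append_sep {sep : Char} {t a r : List Char}
    (hs : sep ∉ t) (h : t <+: a ++ sep :: r) : t <+: a := by
  by_cases hle : t.length ≤ a.length
  · exact List.prefix_of_prefix_length_le h (List.prefix_append a (sep :: r)) hle
  · exfalso
    have ha : a <+: t :=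
      List.prefix_of_prefix_length_le (List.prefix_append a (sep :: r)) h (by omega)
    obtain ⟨t', rfl⟩ := ha
    obtain ⟨v, hv⟩ := h
    have hv' : a ++ (t' ++ v) = a ++ (sep :: r) := by simpa [List.append_assoc] using hv
    have ht' : t' ++ v = sep :: r := List.append_cancel_left hv'
    have hne : t' ≠ [] := by
      intro hnil; subst hnil; simp at hle
    obtain ⟨x, t'', rfl⟩ := List.exists_cons_of_ne_nil hne
    have hx : x = sep := by
      have := congrArg (fun l => l.head?) ht'
      simpa using this
    exact hs (by simp [hx])

-- a sep-free nonempty infix of `a ++ sep :: r` lies in `a` or in `r`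
theorem pv_infix_append_sep {sep : Char} {t : List Char} (hne : t ≠ []) (hs : sep ∉ t)
    (a r : List Char) : t <:+: a ++ sep :: r ↔ t <:+: a ∨ t <:+: r := by
  induction a with
  | nil =>
    simp only [List.nil_append, List.infix_cons_iff]
    constructor
    · rintro (hp | hr)
      · exfalso
        obtain ⟨x, t'', rfl⟩ := List.exists_cons_of_ne_nil hne
        have hx : x = sep := (List.cons_prefix_cons.mp hp).1
        exact hs (by simp [hx])
      · exact Or.inr hr
    · rintro (ha | hr)
      · exact absurd (List.eq_nil_of_infix_nil ha) hne
      · exact Or.inr hr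
  | cons c a' ih =>
    rw [List.cons_append, List.infix_cons_iff, ih]
    constructor
    · rintro (hp | ha' | hr)
      · refine Or.inl (List.IsPrefix.isInfix (pv_prefix_of_append_sep (r := r) hs ?_))
        exact hp
      · exact Or.inl (ha'.trans (List.suffix_cons c a').isInfix)
      · exact Or.inr hr
    · rintro (hca | hr)
      · rcases List.infix_cons_iff.mp hca with hp | ha'
        · refine Or.inl ?_
          have : (c :: a') <+: c :: (a' ++ sep :: r) := by
            exact List.prefix_append (c :: a') (sep :: r)
          exact hp.trans this
        · exact Or.inr (Or.inl ha')
      · exact Or.inr (Or.inr hr)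

-- a sep-free nonempty infix of the sep-joined list is an infix of one of the pieces
theorem pv_infix_join {sep : Char} {t : List Char} (hne : t ≠ []) (hs : sep ∉ t)
    (L : List (List Char)) :
    t <:+: PySem.Chars.join [sep] L ↔ ∃ l ∈ L, t <:+: l := by
  induction L with
  | nil =>
    simp only [PySem.Chars.join_nil, List.mem_nil_iff]
    constructor
    · intro h; exact absurd (List.eq_nil_of_infix_nil h) hne
    · rintro ⟨l, h, -⟩; exact absurd h (by simp)
  | cons a L ih =>
    cases L with
    | nil => simp [PySem.Chars.join_singleton]
    | cons b L' =>
      rw [PySem.Chars.join_cons_cons]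
      rw [show a ++ [sep] ++ PySem.Chars.join [sep] (b :: L') =
            a ++ sep :: PySem.Chars.join [sep] (b :: L') by simp]
      rw [pv_infix_append_sep hne hs, ih]
      constructor
      · rintro (ha | ⟨l, hl, hil⟩)
        · exact ⟨a, by simp, ha⟩
        · exact ⟨l, by simp [hl], hil⟩
      · rintro ⟨l, hl, hil⟩
        rcases List.mem_cons.mp hl with rfl | hl
        · exact Or.inl hil
        · exact Or.inr ⟨l, hl, hil⟩

-- ===== VERDICT (by name: the statement is the Claim_ definition above) =====
theorem extract_compliance_triggers_spec : Claim_equal_extract_compliance_triggers := by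
  intro ps _
  unfold Spec_extract_compliance_triggers extract_compliance_triggers extract_compliance_triggers_alt
  dsimp only
  rw [PySem.List.foldl_append_ite_eq_filter]
  simp only [List.nil_append]
  refine List.filter_congr ?_
  intro t ht
  have hne : t.toList ≠ [] ∧ ('\n' : Char) ∉ t.toList := by
    fin_cases ht <;> decide
  rw [Bool.eq_iff_iff]
  simp only [PySem.List.foldl_if_add_one, zero_add, decide_eq_true_eq]
  rw [PySem.Str.isIn_eq, PySem.Chars.isIn_iff_infix, PySem.Str.toList_join]
  rw [show ("\n" : String).toList = ['\n'] by decide]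
  rw [pv_infix_join hne.1 hne.2]
  constructor
  · intro h
    have : 0 < ps.countP (fun p => PySem.Str.isIn t (PySem.Str.lower p)) := by exact_mod_cast h
    obtain ⟨p, hp, hx⟩ := List.countP_pos_iff.mp this
    refine ⟨(PySem.Str.lower p).toList, ?_, ?_⟩
    · simp only [List.map_map, List.mem_map]
      exact ⟨p, hp, rfl⟩
    · rw [PySem.Str.isIn_eq, PySem.Chars.isIn_iff_infix] at hx; exact hx
  · rintro ⟨l, hl, hil⟩
    simp only [List.map_map, List.mem_map] at hl
    obtain ⟨p, hp, rfl⟩ := hl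
    have hx : PySem.Str.isIn t (PySem.Str.lower p) = true := by
      rw [PySem.Str.isIn_eq, PySem.Chars.isIn_iff_infix]; exact hil
    have : 0 < ps.countP (fun p => PySem.Str.isIn t (PySem.Str.lower p)) :=
      List.countP_pos_iff.mpr ⟨p, hp, hx⟩
    exact_mod_cast this
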